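-- pv_equiv track=rewrite | github.com/mickaelSASL/term | exo/1-facile/1500-top_like/exo_corr.py | top_likes
-- ===== SOURCE A (Python) =====
-- def top_likes(likes):
--     max_pseudo = ""
--     max_likes = -1
--     for pseudo in likes:
--         if likes[pseudo] > max_likes:
--             max_pseudo = pseudo
--             max_likes = likes[pseudo]
--         elif likes[pseudo] == max_likes and pseudo < max_pseudo:
--             max_pseudo = pseudo
--             max_likes = likes[pseudo]
--     return (max_pseudo, max_likes)
-- ===== SOURCE B (Python) =====
-- def top_likes(likes):
--     if not likes:
--         return ("", -1)
--     order = sorted(likes.items(), key=lambda kv: (-kv[1], kv[0]))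
--     return (order[0][0], order[0][1])
-- ===== Notes on version B (the rewrite author's own statement) =====
-- stated objective: alternative
-- what changed: B sorts the items once by the key (-count, pseudo) and returns the front element, instead of A's running-max scan over the keys with an explicit tie-break branch and a per-key dict lookup.
-- intended difference: On non-empty dicts in which every like-count is at most -1 (and which do not contain the entry mapping the empty pseudo to -1, where the two coincide), A never updates its sentinel and returns the sentinel pair of empty pseudo and -1, naming no real pseudo; B returns the actual best pseudo with its true count, which is the intended result. — e.g. on top_likes([("a", -1)]): A returns ("", -1), B returns ("a", -1)
import Mathlib
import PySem

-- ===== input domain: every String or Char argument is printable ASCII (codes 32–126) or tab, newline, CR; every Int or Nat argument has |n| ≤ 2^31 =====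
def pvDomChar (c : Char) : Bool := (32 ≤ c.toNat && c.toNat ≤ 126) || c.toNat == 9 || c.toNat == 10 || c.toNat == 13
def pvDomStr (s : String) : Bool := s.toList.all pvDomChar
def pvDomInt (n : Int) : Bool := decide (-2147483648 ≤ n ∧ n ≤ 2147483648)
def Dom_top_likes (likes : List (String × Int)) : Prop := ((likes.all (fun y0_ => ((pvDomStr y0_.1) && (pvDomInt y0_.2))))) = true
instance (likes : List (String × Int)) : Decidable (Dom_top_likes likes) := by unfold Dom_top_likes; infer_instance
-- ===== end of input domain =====

-- B sorts the items once by (-count, pseudo) and takes the front instead of A's running-max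
-- scan with an explicit tie-break branch; on all-counts-≤-1 dicts B returns the real best
-- pseudo where A returns its sentinel ("", -1) (see D_ below).

-- ===== PORT A =====
-- 'for pseudo in likes' iterates the dict's keys; 'likes[pseudo]' is the dict lookup
-- (pseudo is a key of the dict, so get? is always some and KeyError is unreachable).
def top_likes (likes : List (String × Int)) : String × Int :=
  (PySem.Dict.mk likes).keys.foldl
    (fun acc pseudo =>
      let v : Int := ((PySem.Dict.mk likes).get? pseudo).getD 0
      if v > acc.2 then (pseudo, v)
      else if v = acc.2 ∧ pseudo < acc.1 then (pseudo, v)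
      else acc)
    ("", -1)

-- ===== PORT B =====
def top_likes_alt (likes : List (String × Int)) : String × Int :=
  if likes = [] then ("", -1)
  else
    match PySem.List.sorted2 likes (fun kv => -kv.2) (fun kv => kv.1) with
    | [] => ("", -1)          -- unreachable: sorted2 of a non-empty list is non-empty
    | kv :: _ => (kv.1, kv.2) -- order[0]

-- ===== PRECONDITION & SPEC =====
-- Pre_ requires pairwise-distinct keys: the Python argument is a dict, whose keys are
-- necessarily distinct; an association list with a duplicated key does not represent a dict
-- (Python would collapse it before the function runs, the list port would see both entries).
def Pre_top_likes (likes : List (String × Int)) : Prop :=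
  (likes.map (fun kv => kv.1)).Nodup
instance (likes : List (String × Int)) : Decidable (Pre_top_likes likes) := by
  unfold Pre_top_likes; infer_instance

def pvWitness_top_likes : (List (String × Int)) := [("bob", 3), ("ann", 3), ("zoe", 1)]

-- On non-empty dicts in which every like-count is ≤ -1 (and which do not happen to contain
-- the entry ("", -1), where the two coincide), A never updates its sentinel and returns
-- ("", -1), naming no real pseudo; B returns the actual best pseudo with its true count,
-- which is the intended result.
def D_top_likes (likes : List (String × Int)) : Prop :=
  likes ≠ [] ∧ (∀ kv ∈ likes, kv.2 ≤ -1) ∧ ("", -1) ∉ likes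
instance (likes : List (String × Int)) : Decidable (D_top_likes likes) := by
  unfold D_top_likes; infer_instance

def Spec_top_likes (likes : List (String × Int)) (out : String × Int) : Prop :=
  ¬ D_top_likes likes → out = top_likes_alt likes
instance (likes : List (String × Int)) (out : String × Int) : Decidable (Spec_top_likes likes out) := by
  unfold Spec_top_likes; infer_instance

def pvDiffWitness_top_likes : (List (String × Int)) := [("a", -1)]
def pvDiffWitnessOut_top_likes : (String × Int) × (String × Int) := (("", -1), ("a", -1))

-- ===== CLAIM (what is proved, stated in full; the proofs are below) =====
def Claim_unchanged_top_likes : Prop := ∀ (likes : List (String × Int)), Dom_top_likes likes → Pre_top_likes likes → Spec_top_likes likes (top_likes likes)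
def Claim_exact_top_likes : Prop := ∀ (likes : List (String × Int)), Dom_top_likes likes → Pre_top_likes likes → D_top_likes likes → top_likes likes ≠ top_likes_alt likes
def Claim_changed_top_likes : Prop := Dom_top_likes (pvDiffWitness_top_likes) ∧ Pre_top_likes (pvDiffWitness_top_likes) ∧ D_top_likes (pvDiffWitness_top_likes) ∧ top_likes (pvDiffWitness_top_likes) = pvDiffWitnessOut_top_likes.1 ∧ top_likes_alt (pvDiffWitness_top_likes) = pvDiffWitnessOut_top_likes.2 ∧ pvDiffWitnessOut_top_likes.1 ≠ pvDiffWitnessOut_top_likes.2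

-- ===== LEMMAS AND PROOFS =====

-- the sort key of B, as a single value in a linear order (lexicographic on (-count, pseudo))
def pvKey (kv : String × Int) : Lex (Int × String) := toLex (-kv.2, kv.1)

theorem pvKey_injective : Function.Injective pvKey := by
  intro a b h
  unfold pvKey at h
  have h' : ((-a.2 : Int), a.1) = ((-b.2 : Int), b.1) := congrArg ofLex h
  have h1 := congrArg Prod.fst h'
  have h2 := congrArg Prod.snd h'
  simp at h1 h2
  exact Prod.ext h2 h1

-- B's sorted2 with the tuple key (-count, pseudo) is sorted with the single key pvKey
theorem sorted2_eq_sorted_pvKey (likes : List (String × Int)) :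
    PySem.List.sorted2 likes (fun kv => -kv.2) (fun kv => kv.1)
      = PySem.List.sorted likes pvKey := by
  unfold PySem.List.sorted2 PySem.List.sorted
  simp only [if_neg (by simp : ¬ (false = true))]
  congr 1
  funext acc x
  congr 1
  funext a b
  rw [Bool.eq_iff_iff]
  simp only [pvKey, Bool.or_eq_true, Bool.and_eq_true, Bool.not_eq_true', decide_eq_true_eq,
    decide_eq_false_iff_not, Prod.Lex.lt_iff, ofLex_toLex]
  by_cases h3 : a.1 < b.1 <;>
    first
      | (simp [h3]; omega)
      | simp [h3]

-- A's loop, after resolving the per-key lookup, is a running minimum under pvKey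
theorem top_likes_eq_foldl_min (likes : List (String × Int))
    (hpre : Pre_top_likes likes) :
    top_likes likes
      = likes.foldl (fun acc kv => if pvKey kv < pvKey acc then kv else acc) ("", -1) := by
  unfold top_likes
  rw [PySem.Dict.keys_mk, List.foldl_map]
  refine PySem.List.foldl_congr_mem likes _ _ _ ?_
  intro acc kv hmem
  have hv : ((PySem.Dict.mk likes).get? kv.1).getD 0 = kv.2 := by
    have := PySem.Dict.getD_of_mem_items (PySem.Dict.mk likes) (k := kv.1) (v := kv.2)
      (by exact hmem) (by rw [PySem.Dict.keys_mk]; exact hpre) 0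
    rwa [PySem.Dict.getD_eq_get?_getD] at this
  simp only [hv]
  have hlt : (pvKey kv < pvKey acc) ↔ (kv.2 > acc.2 ∨ (kv.2 = acc.2 ∧ kv.1 < acc.1)) := by
    unfold pvKey
    rw [Prod.Lex.lt_iff]
    simp only [ofLex_toLex]
    rw [show ((-kv.2 : Int) < -acc.2) = (kv.2 > acc.2) from propext (by omega),
        show ((-kv.2 : Int) = -acc.2) = (kv.2 = acc.2) from propext (by omega)]
  by_cases h1 : kv.2 > acc.2
  · rw [if_pos h1, if_pos (hlt.mpr (Or.inl h1))]
  · rw [if_neg h1]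
    by_cases h2 : kv.2 = acc.2 ∧ kv.1 < acc.1
    · rw [if_pos h2, if_pos (hlt.mpr (Or.inr h2))]
    · rw [if_neg h2, if_neg (fun h => (by rcases hlt.mp h with h | h; exact h1 h; exact h2 h))]

-- the running minimum: membership and minimality
theorem foldl_min_props (xs : List (String × Int)) (init : String × Int) :
    (xs.foldl (fun acc kv => if pvKey kv < pvKey acc then kv else acc) init = init
        ∨ xs.foldl (fun acc kv => if pvKey kv < pvKey acc then kv else acc) init ∈ xs)
      ∧ pvKey (xs.foldl (fun acc kv => if pvKey kv < pvKey acc then kv else acc) init) ≤ pvKey init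
      ∧ ∀ y ∈ xs, pvKey (xs.foldl (fun acc kv => if pvKey kv < pvKey acc then kv else acc) init) ≤ pvKey y := by
  induction xs generalizing init with
  | nil => simp
  | cons x t ih =>
    simp only [List.foldl_cons]
    by_cases h : pvKey x < pvKey init
    · rw [if_pos h]
      obtain ⟨hm, hle, hall⟩ := ih x
      refine ⟨?_, le_trans hle (le_of_lt h), ?_⟩
      · rcases hm with hm | hm
        · exact Or.inr (by rw [hm]; exact List.mem_cons_self)
        · exact Or.inr (List.mem_cons_of_mem _ hm)
      · intro y hy
        rcases List.mem_cons.mp hy with rfl | hy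
        · exact hle
        · exact hall y hy
    · rw [if_neg h]
      obtain ⟨hm, hle, hall⟩ := ih init
      refine ⟨?_, hle, ?_⟩
      · rcases hm with hm | hm
        · exact Or.inl hm
        · exact Or.inr (List.mem_cons_of_mem _ hm)
      · intro y hy
        rcases List.mem_cons.mp hy with rfl | hy
        · exact le_trans hle (not_lt.mp h)
        · exact hall y hy

-- nothing beats A's sentinel ("", -1) when every count is ≤ -1
theorem not_lt_sentinel (kv : String × Int) (h : kv.2 ≤ -1) :
    ¬ pvKey kv < pvKey ("", -1) := by
  unfold pvKey
  rw [Prod.Lex.lt_iff]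
  simp only [ofLex_toLex]
  rintro (h1 | ⟨h1, h2⟩)
  · omega
  · exact (by simp [String.lt_iff_toList_lt] : ¬ kv.1 < "") h2

theorem foldl_min_stays (xs : List (String × Int)) (init : String × Int)
    (h : ∀ x ∈ xs, ¬ pvKey x < pvKey init) :
    xs.foldl (fun acc kv => if pvKey kv < pvKey acc then kv else acc) init = init := by
  induction xs with
  | nil => rfl
  | cons x t ih =>
    simp only [List.foldl_cons, if_neg (h x List.mem_cons_self)]
    exact ih (fun y hy => h y (List.mem_cons_of_mem _ hy))

-- ===== VERDICT (by name: the statement is the Claim_ definition above) =====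
theorem top_likes_spec : Claim_unchanged_top_likes := by
  intro likes _hdom hpre hnd
  by_cases hnil : likes = []
  · subst hnil
    simp [top_likes, top_likes_alt, PySem.Dict.keys_mk]
  · -- characterize A as a fold-minimum r, and B as the head m of the sorted list
    rw [top_likes_eq_foldl_min likes hpre]
    obtain ⟨hmem, hinit, hall⟩ := foldl_min_props likes ("", -1)
    set r := likes.foldl (fun acc kv => if pvKey kv < pvKey acc then kv else acc) ("", -1) with hr
    unfold top_likes_alt
    rw [if_neg hnil, sorted2_eq_sorted_pvKey]
    have hsn : PySem.List.sorted likes pvKey ≠ [] := by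
      intro h; exact hnil ((PySem.List.sorted_eq_nil_iff likes pvKey false).mp h)
    obtain ⟨m, t, hmt⟩ := List.exists_cons_of_ne_nil hsn
    rw [hmt]
    have hmmem : m ∈ likes := by
      have : m ∈ PySem.List.sorted likes pvKey := by rw [hmt]; exact List.mem_cons_self
      rwa [PySem.List.mem_sorted] at this
    have hmmin : ∀ y ∈ likes, pvKey m ≤ pvKey y :=
      PySem.List.key_head_sorted_le likes pvKey hmt
    by_cases hex : ∃ kv ∈ likes, ¬ kv.2 ≤ -1
    · -- some entry beats the sentinel: A's minimum lies in the list, so it equals B's head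
      obtain ⟨kv₀, hkv₀, hv₀⟩ := hex
      have hkv₀lt : pvKey kv₀ < pvKey ("", -1) := by
        unfold pvKey
        rw [Prod.Lex.lt_iff]
        exact Or.inl (by simp; omega)
      have hrmem : r ∈ likes := by
        rcases hmem with hm | hm
        · exact absurd (lt_of_le_of_lt (hall kv₀ hkv₀) hkv₀lt) (by rw [hm]; exact lt_irrefl _)
        · exact hm
      have : r = m :=
        pvKey_injective (le_antisymm (hall m hmmem) (hmmin r hrmem))
      rw [this]
    · -- every count is ≤ -1; since ¬D_, the entry ("", -1) itself is in the list,
      -- and both programs return exactly it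
      push Not at hex
      have hin : ("", -1) ∈ likes := by
        by_contra hnot
        exact hnd ⟨hnil, hex, hnot⟩
      have hra : r = ("", -1) :=
        foldl_min_stays likes ("", -1) (fun x hx => not_lt_sentinel x (hex x hx))
      have hmb : m = ("", -1) :=
        pvKey_injective (le_antisymm (hmmin _ hin) (not_lt.mp (not_lt_sentinel m (hex m hmmem))))
      rw [hra, hmb]

theorem top_likes_changed : Claim_changed_top_likes := by
  unfold Claim_changed_top_likes pvDiffWitness_top_likes pvDiffWitnessOut_top_likes
  refine ⟨by decide, by decide, by decide, ?_, ?_, by decide⟩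
  · simp [top_likes, PySem.Dict.keys_mk, PySem.Dict.get?_mk_cons]
  · simp [top_likes_alt, PySem.List.sorted2, PySem.List.insertBy]

theorem top_likes_tight : Claim_exact_top_likes := by
  intro likes _hdom hpre hd heq
  obtain ⟨hnil, hle, hnot⟩ := hd
  have hra : top_likes likes = ("", -1) := by
    rw [top_likes_eq_foldl_min likes hpre]
    exact foldl_min_stays likes ("", -1) (fun x hx => not_lt_sentinel x (hle x hx))
  have hsn : PySem.List.sorted likes pvKey ≠ [] := by
    intro h; exact hnil ((PySem.List.sorted_eq_nil_iff likes pvKey false).mp h)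
  obtain ⟨m, t, hmt⟩ := List.exists_cons_of_ne_nil hsn
  have hmmem : m ∈ likes := by
    have : m ∈ PySem.List.sorted likes pvKey := by rw [hmt]; exact List.mem_cons_self
    rwa [PySem.List.mem_sorted] at this
  have hrb : top_likes_alt likes = m := by
    unfold top_likes_alt
    rw [if_neg hnil, sorted2_eq_sorted_pvKey, hmt]
  rw [hra, hrb] at heq
  exact hnot (heq ▸ hmmem)
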